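-- pv_equiv track=rewrite | github.com/Ralf-Kemmann/Quantum-Spacetime-Bridge | scripts/run_bmc14e_degree_copula_structured_nulls.py | graph_components
-- ===== SOURCE A (Python) =====
-- from collections import Counter, defaultdict, deque
-- from typing import Any, Dict, List, Sequence, Set, Tuple
--
-- def graph_components(rows: Sequence[Dict[str, Any]]) -> Tuple[int, int, int]:
--     nodes = sorted({str(r["source"]) for r in rows} | {str(r["target"]) for r in rows})
--     if not nodes:
--         return 0, 0, 0
--     adj: Dict[str, Set[str]] = {n: set() for n in nodes}
--     for row in rows:
--         a, b = str(row["source"]), str(row["target"])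
--         adj.setdefault(a, set()).add(b)
--         adj.setdefault(b, set()).add(a)
--     seen: Set[str] = set()
--     sizes: List[int] = []
--     for start in nodes:
--         if start in seen:
--             continue
--         q = deque([start])
--         seen.add(start)
--         size = 0
--         while q:
--             cur = q.popleft()
--             size += 1
--             for nxt in adj.get(cur, set()):
--                 if nxt not in seen:
--                     seen.add(nxt)
--                     q.append(nxt)
--         sizes.append(size)
--     return len(nodes), len(sizes), max(sizes) if sizes else 0
-- ===== SOURCE B (Python) =====
-- def graph_components(rows):
--     # label-merging connected components: one pass over the edges keeping a
--     # node -> class-label map; merging two classes relabels the smaller-indexed pass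
--     label = {}
--     for row in rows:
--         a, b = str(row["source"]), str(row["target"])
--         la = label.setdefault(a, a)
--         lb = label.setdefault(b, b)
--         if la != lb:
--             for n, l in label.items():
--                 if l == lb:
--                     label[n] = la
--     if not label:
--         return 0, 0, 0
--     counts = {}
--     for l in label.values():
--         counts[l] = counts.get(l, 0) + 1
--     return len(label), len(counts), max(counts.values())
-- ===== Notes on version B (the rewrite author's own statement) =====
-- stated objective: alternative
-- what changed: Replaced the sorted-node/adjacency-set/BFS-per-component traversal by a single pass over the edges that maintains a node-to-class-label map (merging two classes by relabelling), with node count, component count and largest component read off the final label map and a counter of its values.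
import Mathlib
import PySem

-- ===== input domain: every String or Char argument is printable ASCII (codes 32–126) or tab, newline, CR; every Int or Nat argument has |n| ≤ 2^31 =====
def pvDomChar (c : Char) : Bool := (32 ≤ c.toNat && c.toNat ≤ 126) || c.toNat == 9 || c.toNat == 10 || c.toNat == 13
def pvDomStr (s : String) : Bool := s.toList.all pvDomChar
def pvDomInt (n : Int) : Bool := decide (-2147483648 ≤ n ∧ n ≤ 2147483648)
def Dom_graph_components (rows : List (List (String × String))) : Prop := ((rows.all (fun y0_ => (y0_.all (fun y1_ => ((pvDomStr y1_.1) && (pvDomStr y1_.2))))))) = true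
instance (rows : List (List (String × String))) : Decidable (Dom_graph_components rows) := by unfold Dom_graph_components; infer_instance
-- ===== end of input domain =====

-- B replaces A's sorted-node/adjacency-set/BFS-per-component traversal by one pass over the edges
-- maintaining a node→class-label map (merge = relabel) and then counting labels (objective: alternative).

-- ===== PORT A =====
-- r["source"] under the dict convention (lookup = first match); a missing key (Python KeyError) is excluded by Pre_
def pvKeyA (r : List (String × String)) (k : String) : String :=
  ((PySem.Dict.mk r).get? k).getD ""

-- the 'while q' loop; fuel = number of nodes, which always suffices (each iteration pops an element,
-- and every element ever enqueued was freshly added to 'seen', which only holds node strings)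
def pvBfs (adj : PySem.Dict String (PySem.Set String)) :
    Nat → List String → PySem.Set String → Int → PySem.Set String × Int
  | 0, _, seen, size => (seen, size)
  | _ + 1, [], seen, size => (seen, size)
  | fuel + 1, cur :: rest, seen, size =>
      let st := ((adj.get? cur).getD PySem.Set.empty).foldl
        (fun (p : List String × PySem.Set String) nxt =>
          if PySem.Set.contains p.2 nxt then p else (p.1 ++ [nxt], PySem.Set.add p.2 nxt))
        (rest, seen)
      pvBfs adj fuel st.1 st.2 (size + 1)

def graph_components (rows : List (List (String × String))) : Int × Int × Int :=
  let nodes := PySem.List.sorted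
      (PySem.Set.union (PySem.Set.ofList (rows.map (fun r => pvKeyA r "source")))
        (PySem.Set.ofList (rows.map (fun r => pvKeyA r "target")))) (fun x => x) false
  if nodes.isEmpty then (0, 0, 0)
  else
    let adj0 : PySem.Dict String (PySem.Set String) :=
      nodes.foldl (fun d n => d.insert n PySem.Set.empty) PySem.Dict.empty
    let adj := rows.foldl (fun (d : PySem.Dict String (PySem.Set String)) r =>
        let a := pvKeyA r "source"
        let b := pvKeyA r "target"
        let d := d.modify a PySem.Set.empty (fun s => PySem.Set.add s b)
        d.modify b PySem.Set.empty (fun s => PySem.Set.add s a)) adj0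
    let st := nodes.foldl (fun (st : PySem.Set String × List Int) start =>
        if PySem.Set.contains st.1 start then st
        else
          let r := pvBfs adj nodes.length [start] (PySem.Set.add st.1 start) 0
          (r.1, st.2 ++ [r.2])) (PySem.Set.empty, ([] : List Int))
    ((nodes.length : Int), (st.2.length : Int),
      match PySem.List.max? st.2 (fun x => x) with
      | some m => m
      | none => 0)

-- ===== PORT B =====
-- row["source"]: first pair with the key (= dict lookup); missing key excluded by Pre_
def pvKeyB (r : List (String × String)) (k : String) : String :=
  match r with
  | [] => ""
  | p :: rest => if p.1 == k then p.2 else pvKeyB rest k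

-- 'for n, l in label.items(): if l == lb: label[n] = la' — in-place value updates: keys and order unchanged
def pvRelabel (d : PySem.Dict String String) (la lb : String) : PySem.Dict String String :=
  PySem.Dict.mk (d.items.map (fun p => if p.2 == lb then (p.1, la) else p))

def graph_components_alt (rows : List (List (String × String))) : Int × Int × Int :=
  let label := rows.foldl (fun (d : PySem.Dict String String) r =>
      let a := pvKeyB r "source"
      let b := pvKeyB r "target"
      let d := d.setdefault a a
      let la := d.getD a a
      let d := d.setdefault b b
      let lb := d.getD b b
      if la == lb then d else pvRelabel d la lb) PySem.Dict.empty
  if label.size == 0 then (0, 0, 0)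
  else
    let counts := label.values.foldl
      (fun (c : PySem.Dict String Int) l => c.insert l (c.getD l 0 + 1)) PySem.Dict.empty
    ((label.size : Int), (counts.size : Int),
      match PySem.List.max? counts.values (fun x => x) with
      | some m => m
      | none => 0)

-- ===== PRECONDITION & SPEC =====
-- Pre_ excludes exactly the rows without a "source" or "target" key, on which the Python A raises KeyError
def Pre_graph_components (rows : List (List (String × String))) : Prop :=
  (rows.all (fun r => (PySem.Dict.mk r).contains "source" && (PySem.Dict.mk r).contains "target")) = true
instance (rows : List (List (String × String))) : Decidable (Pre_graph_components rows) := by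
  unfold Pre_graph_components; infer_instance

def pvWitness_graph_components : (List (List (String × String))) :=
  [[("source", "x"), ("target", "y")], [("source", "y"), ("target", "z")]]

def Spec_graph_components (rows : List (List (String × String))) (out : Int × Int × Int) : Prop := out = graph_components_alt rows
instance (rows : List (List (String × String))) (out : Int × Int × Int) : Decidable (Spec_graph_components rows out) := by unfold Spec_graph_components; infer_instance

-- ===== CLAIM (what is proved, stated in full; the proofs are below) =====
def Claim_equal_graph_components : Prop := ∀ (rows : List (List (String × String))), Dom_graph_components rows → Pre_graph_components rows → Spec_graph_components rows (graph_components rows)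

-- ===== LEMMAS AND PROOFS =====

theorem pvEqvGen_mono {α : Type} {r r' : α → α → Prop} (h : ∀ x y, r x y → r' x y) {x y : α}
    (hxy : Relation.EqvGen r x y) : Relation.EqvGen r' x y := by
  induction hxy with
  | rel u v huv => exact Relation.EqvGen.rel u v (h u v huv)
  | refl u => exact Relation.EqvGen.refl u
  | symm u v _ ih => exact Relation.EqvGen.symm u v ih
  | trans u v w _ _ ih1 ih2 => exact Relation.EqvGen.trans u v w ih1 ih2

theorem pvEqvGen_add_pair {α : Type} (r : α → α → Prop) (a b x y : α) :
    Relation.EqvGen (fun u v => r u v ∨ ((u = a ∧ v = b) ∨ (u = b ∧ v = a))) x y ↔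
    (Relation.EqvGen r x y ∨
      (Relation.EqvGen r x a ∧ Relation.EqvGen r b y) ∨
      (Relation.EqvGen r x b ∧ Relation.EqvGen r a y)) := by
  have t : ∀ {p q s : α}, Relation.EqvGen r p q → Relation.EqvGen r q s → Relation.EqvGen r p s :=
    fun h1 h2 => Relation.EqvGen.trans _ _ _ h1 h2
  have sy : ∀ {p q : α}, Relation.EqvGen r p q → Relation.EqvGen r q p :=
    fun h1 => Relation.EqvGen.symm _ _ h1
  constructor
  · intro h
    induction h with
    | rel u v huv =>
      rcases huv with h | ⟨hua, hvb⟩ | ⟨hub, hva⟩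
      · exact Or.inl (Relation.EqvGen.rel u v h)
      · subst hua; subst hvb
        exact Or.inr (Or.inl ⟨Relation.EqvGen.refl u, Relation.EqvGen.refl v⟩)
      · subst hub; subst hva
        exact Or.inr (Or.inr ⟨Relation.EqvGen.refl u, Relation.EqvGen.refl v⟩)
    | refl u => exact Or.inl (Relation.EqvGen.refl u)
    | symm u v _ ih =>
      rcases ih with h | ⟨h1, h2⟩ | ⟨h1, h2⟩
      · exact Or.inl (sy h)
      · exact Or.inr (Or.inr ⟨sy h2, sy h1⟩)
      · exact Or.inr (Or.inl ⟨sy h2, sy h1⟩)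
    | trans u v w _ _ ih1 ih2 =>
      rcases ih1 with h1 | ⟨h1, h1'⟩ | ⟨h1, h1'⟩ <;> rcases ih2 with h2 | ⟨h2, h2'⟩ | ⟨h2, h2'⟩
      · exact Or.inl (t h1 h2)
      · exact Or.inr (Or.inl ⟨t h1 h2, h2'⟩)
      · exact Or.inr (Or.inr ⟨t h1 h2, h2'⟩)
      · exact Or.inr (Or.inl ⟨h1, t h1' h2⟩)
      · exact Or.inl (t h1 (t (sy (t h1' h2)) h2'))
      · exact Or.inl (t h1 h2')
      · exact Or.inr (Or.inr ⟨h1, t h1' h2⟩)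
      · exact Or.inl (t h1 h2')
      · exact Or.inl (t h1 (t (sy (t h1' h2)) h2'))
  · intro h
    have base : ∀ {u v : α}, Relation.EqvGen r u v →
        Relation.EqvGen (fun u v => r u v ∨ ((u = a ∧ v = b) ∨ (u = b ∧ v = a))) u v :=
      fun h1 => pvEqvGen_mono (fun _ _ hr => Or.inl hr) h1
    have hab : Relation.EqvGen (fun u v => r u v ∨ ((u = a ∧ v = b) ∨ (u = b ∧ v = a))) a b :=
      Relation.EqvGen.rel a b (Or.inr (Or.inl ⟨rfl, rfl⟩))
    rcases h with h | ⟨h1, h2⟩ | ⟨h1, h2⟩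
    · exact base h
    · exact Relation.EqvGen.trans _ _ _ (base h1)
        (Relation.EqvGen.trans _ _ _ hab (base h2))
    · exact Relation.EqvGen.trans _ _ _ (base h1)
        (Relation.EqvGen.trans _ _ _ (Relation.EqvGen.symm _ _ hab) (base h2))

-- ===== edges, step relation, connectivity =====

def pvStep (l : List (String × String)) (x y : String) : Prop := (x, y) ∈ l ∨ (y, x) ∈ l

def pvConn (l : List (String × String)) : String → String → Prop := Relation.EqvGen (pvStep l)

def pvNodesOf (l : List (String × String)) : List String := l.flatMap (fun e => [e.1, e.2])

theorem pvStep_symm {l : List (String × String)} {x y : String} (h : pvStep l x y) : pvStep l y x := h.symm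

theorem pvStep_append_pair (l : List (String × String)) (a b x y : String) :
    pvStep (l ++ [(a, b)]) x y ↔ (pvStep l x y ∨ ((x = a ∧ y = b) ∨ (x = b ∧ y = a))) := by
  simp [pvStep, List.mem_append, Prod.ext_iff]; tauto

theorem pvConn_append_pair (l : List (String × String)) (a b x y : String) :
    pvConn (l ++ [(a, b)]) x y ↔
    (pvConn l x y ∨ (pvConn l x a ∧ pvConn l b y) ∨ (pvConn l x b ∧ pvConn l a y)) := by
  unfold pvConn
  rw [← pvEqvGen_add_pair (pvStep l) a b x y]
  constructor
  · exact pvEqvGen_mono (fun u v h => (pvStep_append_pair l a b u v).mp h)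
  · exact pvEqvGen_mono (fun u v h => (pvStep_append_pair l a b u v).mpr h)

theorem pvStep_mem_nodes {l : List (String × String)} {x y : String} (h : pvStep l x y) :
    x ∈ pvNodesOf l ∧ y ∈ pvNodesOf l := by
  simp only [pvNodesOf, List.mem_flatMap]
  rcases h with h | h
  · exact ⟨⟨(x, y), h, by simp⟩, ⟨(x, y), h, by simp⟩⟩
  · exact ⟨⟨(y, x), h, by simp⟩, ⟨(y, x), h, by simp⟩⟩

theorem pvConn_mem_nodes {l : List (String × String)} {x y : String} (h : pvConn l x y) :
    x = y ∨ (x ∈ pvNodesOf l ∧ y ∈ pvNodesOf l) := by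
  induction h with
  | rel u v huv => exact Or.inr (pvStep_mem_nodes huv)
  | refl u => exact Or.inl rfl
  | symm u v _ ih => tauto
  | trans u v w _ _ ih1 ih2 =>
    rcases ih1 with rfl | ⟨h1, h2⟩
    · exact ih2
    · rcases ih2 with rfl | ⟨h3, h4⟩ <;> tauto

theorem pvConn_trans {l : List (String × String)} {x y z : String} (h1 : pvConn l x y)
    (h2 : pvConn l y z) : pvConn l x z := Relation.EqvGen.trans _ _ _ h1 h2

theorem pvConn_symm {l : List (String × String)} {x y : String} (h : pvConn l x y) :
    pvConn l y x := Relation.EqvGen.symm _ _ h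

theorem pvConn_refl (l : List (String × String)) (x : String) : pvConn l x x :=
  Relation.EqvGen.refl x

-- ===== ports (copies for development) =====

theorem pvKeyB_eq_pvKeyA (r : List (String × String)) (k : String) : pvKeyB r k = pvKeyA r k := by
  induction r with
  | nil => rfl
  | cons p rest ih =>
    unfold pvKeyB pvKeyA PySem.Dict.get?
    by_cases h : (p.1 == k) = true
    · simp [h]
    · simp only [List.find?_cons]
      rw [if_neg h]
      simp only [h]
      exact ih

def pvBStep (d : PySem.Dict String String) (a b : String) : PySem.Dict String String :=
  let d := d.setdefault a a
  let la := d.getD a a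
  let d := d.setdefault b b
  let lb := d.getD b b
  if la == lb then d else pvRelabel d la lb

def pvLab (d : PySem.Dict String String) (x : String) : String := d.getD x ""

-- ===== relabel lemmas =====

theorem pvRelabel_keys (d : PySem.Dict String String) (la lb : String) :
    (pvRelabel d la lb).keys = d.keys := by
  unfold pvRelabel PySem.Dict.keys
  rcases d with ⟨items⟩
  simp only [List.map_map]
  congr 1
  funext p
  simp only [Function.comp]
  split <;> rfl

theorem pvRelabel_get? (d : PySem.Dict String String) (la lb x : String) :
    (pvRelabel d la lb).get? x = (d.get? x).map (fun v => if v == lb then la else v) := by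
  unfold pvRelabel PySem.Dict.get?
  rcases d with ⟨items⟩
  induction items with
  | nil => rfl
  | cons p rest ih =>
    have hfst : (if (p.2 == lb) = true then (p.1, la) else p).1 = p.1 := by split <;> rfl
    simp only [List.map_cons]
    by_cases hx : (p.1 == x) = true
    · rw [List.find?_cons_of_pos (by rw [hfst]; exact hx), List.find?_cons_of_pos (p := fun q : String × String => q.1 == x) hx]
      by_cases h2 : (p.2 == lb) = true <;> simp [h2] <;> intro hc <;>
        simp [beq_iff_eq] at h2 <;> tauto
    · rw [List.find?_cons_of_neg (by rw [hfst]; simpa using hx),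
        List.find?_cons_of_neg (p := fun q : String × String => q.1 == x) (by simpa using hx)]
      exact ih

-- ===== the label-map invariant =====

def pvInvC (l : List (String × String)) (d : PySem.Dict String String) : Prop :=
  (∀ x ∈ pvNodesOf l, x ∈ d.keys) ∧
  (∀ x ∈ d.keys, pvLab d x ∈ d.keys) ∧
  (∀ x ∈ d.keys, ∀ y ∈ d.keys, (pvLab d x = pvLab d y ↔ pvConn l x y))

theorem pvLab_getD (d : PySem.Dict String String) (x : String) (c : String)
    (hx : x ∈ d.keys) : d.getD x c = pvLab d x := by
  cases hget : d.get? x with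
  | none => exact absurd ((PySem.Dict.get?_eq_none_iff_not_mem_keys d x).mp hget) (by simpa using hx)
  | some v => rw [pvLab, PySem.Dict.getD_eq_get?_getD, PySem.Dict.getD_eq_get?_getD, hget]; rfl

theorem pvLab_setdefault_of_mem (d : PySem.Dict String String) (n x : String)
    (hx : x ∈ d.keys) : pvLab (d.setdefault n n) x = pvLab d x := by
  by_cases hxn : x = n
  · subst hxn
    rw [pvLab, PySem.Dict.getD_eq_get?_getD, PySem.Dict.get?_setdefault_self]
    cases hget : d.get? x with
    | none => exact absurd ((PySem.Dict.get?_eq_none_iff_not_mem_keys d x).mp hget) (by simpa using hx)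
    | some v => rw [pvLab, PySem.Dict.getD_eq_get?_getD, hget]; rfl
  · rw [pvLab, pvLab, PySem.Dict.getD_eq_get?_getD, PySem.Dict.getD_eq_get?_getD,
      PySem.Dict.get?_setdefault_of_ne _ _ hxn]

theorem pvLab_setdefault_fresh (d : PySem.Dict String String) (n : String)
    (hn : n ∉ d.keys) : pvLab (d.setdefault n n) n = n := by
  rw [pvLab, PySem.Dict.getD_eq_get?_getD, PySem.Dict.get?_setdefault_self,
    (PySem.Dict.get?_eq_none_iff_not_mem_keys d n).mpr hn]
  rfl

theorem pvKeys_setdefault_self (d : PySem.Dict String String) (n : String) :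
    (d.setdefault n n).keys = PySem.Set.add d.keys n := by
  rw [PySem.Dict.keys_setdefault, PySem.Set.add]
  by_cases h : n ∈ d.keys
  · rw [if_pos ((PySem.Dict.contains_iff_mem_keys d n).mpr h),
      if_pos (by simpa [PySem.Set.contains, List.contains_iff_mem] using h)]
  · rw [if_neg (by simpa using (PySem.Dict.contains_iff_mem_keys d n).not.mpr h),
      if_neg (by simpa [PySem.Set.contains, List.contains_iff_mem] using h)]

theorem pvInvC_setdefault (l : List (String × String)) (d : PySem.Dict String String)
    (n : String) (h : pvInvC l d) : pvInvC l (d.setdefault n n) := by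
  obtain ⟨hN, hK, hC⟩ := h
  have hkeys := pvKeys_setdefault_self d n
  have hmem : ∀ x, x ∈ (d.setdefault n n).keys ↔ x ∈ d.keys ∨ x = n := by
    intro x; rw [hkeys]; exact PySem.Set.mem_add d.keys n x
  by_cases hn : n ∈ d.keys
  · have hsame : ∀ x, x ∈ (d.setdefault n n).keys ↔ x ∈ d.keys := by
      intro x; rw [hmem]; constructor
      · rintro (h | rfl) <;> [exact h; exact hn]
      · exact Or.inl
    refine ⟨fun x hx => (hsame x).mpr (hN x hx), fun x hx => ?_, fun x hx y hy => ?_⟩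
    · rw [pvLab_setdefault_of_mem d n x ((hsame x).mp hx)]
      exact (hsame _).mpr (hK x ((hsame x).mp hx))
    · rw [pvLab_setdefault_of_mem d n x ((hsame x).mp hx),
        pvLab_setdefault_of_mem d n y ((hsame y).mp hy)]
      exact hC x ((hsame x).mp hx) y ((hsame y).mp hy)
  · -- n is fresh and isolated
    have hiso : ∀ y, pvConn l n y → y = n := by
      intro y hc
      rcases pvConn_mem_nodes hc with rfl | ⟨h1, _⟩
      · rfl
      · exact absurd (hN n h1) hn
    have hfresh := pvLab_setdefault_fresh d n hn
    refine ⟨fun x hx => (hmem x).mpr (Or.inl (hN x hx)), fun x hx => ?_, fun x hx y hy => ?_⟩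
    · rcases (hmem x).mp hx with hx' | hxn
      · rw [pvLab_setdefault_of_mem d n x hx']
        exact (hmem _).mpr (Or.inl (hK x hx'))
      · rw [hxn, hfresh]; exact (hmem n).mpr (Or.inr rfl)
    · rcases (hmem x).mp hx with hx' | hxn
      · rcases (hmem y).mp hy with hy' | hyn
        · rw [pvLab_setdefault_of_mem d n x hx', pvLab_setdefault_of_mem d n y hy']
          exact hC x hx' y hy'
        · -- y = n fresh
          rw [hyn, pvLab_setdefault_of_mem d n x hx', hfresh]
          constructor
          · intro hl; exact absurd (hl ▸ hK x hx') hn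
          · intro hc; exact absurd ((hiso x (pvConn_symm hc)) ▸ hx') hn
      · rw [hxn]
        rcases (hmem y).mp hy with hy' | hyn
        · rw [pvLab_setdefault_of_mem d n y hy', hfresh]
          constructor
          · intro hl; exact absurd (hl.symm ▸ hK y hy') hn
          · intro hc; exact absurd ((hiso y hc) ▸ hy') hn
        · rw [hyn]; simp [pvConn_refl]

theorem pvNodesOf_append_pair (l : List (String × String)) (a b : String) :
    pvNodesOf (l ++ [(a, b)]) = pvNodesOf l ++ [a, b] := by
  simp [pvNodesOf]

theorem pvLab_relabel (d : PySem.Dict String String) (la lb x : String) (hx : x ∈ d.keys) :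
    pvLab (pvRelabel d la lb) x = if pvLab d x = lb then la else pvLab d x := by
  cases hget : d.get? x with
  | none => exact absurd ((PySem.Dict.get?_eq_none_iff_not_mem_keys d x).mp hget) (by simpa using hx)
  | some v =>
    have hv : pvLab d x = v := by rw [pvLab, PySem.Dict.getD_eq_get?_getD, hget]; rfl
    rw [pvLab, PySem.Dict.getD_eq_get?_getD, pvRelabel_get?, hget, hv]
    by_cases h : v = lb <;> simp [h]

theorem pvInvC_union (l : List (String × String)) (d : PySem.Dict String String)
    (a b : String) (h : pvInvC l d) (ha : a ∈ d.keys) (hb : b ∈ d.keys) :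
    pvInvC (l ++ [(a, b)])
      (if pvLab d a == pvLab d b then d else pvRelabel d (pvLab d a) (pvLab d b)) := by
  obtain ⟨hN, hK, hC⟩ := h
  have hNmem : ∀ x ∈ pvNodesOf (l ++ [(a, b)]), x ∈ d.keys := by
    intro x hx
    rw [pvNodesOf_append_pair] at hx
    rcases List.mem_append.mp hx with hx | hx
    · exact hN x hx
    · simp only [List.mem_cons] at hx
      rcases hx with rfl | rfl | h
      · exact ha
      · exact hb
      · cases h
  by_cases heq : pvLab d a = pvLab d b
  · rw [if_pos (by simpa using heq)]
    have hab : pvConn l a b := (hC a ha b hb).mp heq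
    refine ⟨hNmem, hK, fun x hx y hy => ?_⟩
    rw [pvConn_append_pair, hC x hx y hy]
    constructor
    · exact Or.inl
    · rintro (h | ⟨h1, h2⟩ | ⟨h1, h2⟩)
      · exact h
      · exact pvConn_trans (pvConn_trans h1 hab) h2
      · exact pvConn_trans (pvConn_trans h1 (pvConn_symm hab)) h2
  · rw [if_neg (by simpa using heq)]
    set la := pvLab d a with hla
    set lb := pvLab d b with hlb
    have hkeys : (pvRelabel d la lb).keys = d.keys := pvRelabel_keys d la lb
    have hlab : ∀ x ∈ d.keys, pvLab (pvRelabel d la lb) x =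
        if pvLab d x = lb then la else pvLab d x := fun x hx => pvLab_relabel d la lb x hx
    refine ⟨fun x hx => hkeys ▸ hNmem x hx, fun x hx => ?_, fun x hx y hy => ?_⟩
    · rw [hkeys] at hx ⊢
      rw [hlab x hx]
      split
      · exact hK a ha
      · exact hK x hx
    · rw [hkeys] at hx hy
      rw [hlab x hx, hlab y hy, pvConn_append_pair]
      have Hxa : pvLab d x = la ↔ pvConn l x a := hC x hx a ha
      have Hxb : pvLab d x = lb ↔ pvConn l x b := hC x hx b hb
      have Hya : pvLab d y = la ↔ pvConn l y a := hC y hy a ha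
      have Hyb : pvLab d y = lb ↔ pvConn l y b := hC y hy b hb
      have Hxy : pvLab d x = pvLab d y ↔ pvConn l x y := hC x hx y hy
      by_cases h1 : pvLab d x = lb <;> by_cases h2 : pvLab d y = lb
      · -- both in b's class
        rw [if_pos h1, if_pos h2]
        simp only [true_iff]
        exact Or.inl (pvConn_trans (Hxb.mp h1) (pvConn_symm (Hyb.mp h2)))
      · rw [if_pos h1, if_neg h2]
        constructor
        · intro hl
          exact Or.inr (Or.inr ⟨Hxb.mp h1, pvConn_symm (Hya.mp (hl.symm))⟩)
        · rintro (hc | ⟨hc1, hc2⟩ | ⟨hc1, hc2⟩)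
          · exact absurd (Hyb.mpr (pvConn_trans (pvConn_symm hc) (Hxb.mp h1))) h2
          · exact absurd (Hyb.mpr (pvConn_symm hc2)) h2
          · exact (Hya.mpr (pvConn_symm hc2)).symm
      · rw [if_neg h1, if_pos h2]
        constructor
        · intro hl
          exact Or.inr (Or.inl ⟨Hxa.mp hl, pvConn_symm (Hyb.mp h2)⟩)
        · rintro (hc | ⟨hc1, hc2⟩ | ⟨hc1, hc2⟩)
          · exact absurd (Hxb.mpr (pvConn_trans hc (Hyb.mp h2))) h1
          · exact Hxa.mpr hc1
          · exact absurd (Hxb.mpr hc1) h1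
      · rw [if_neg h1, if_neg h2]
        rw [Hxy]
        constructor
        · exact Or.inl
        · rintro (hc | ⟨hc1, hc2⟩ | ⟨hc1, hc2⟩)
          · exact hc
          · exact absurd (Hyb.mpr (pvConn_symm hc2)) h2
          · exact absurd (Hxb.mpr hc1) h1

def pvInvFull (l : List (String × String)) (d : PySem.Dict String String) : Prop :=
  pvInvC l d ∧ d.keys = PySem.Set.ofList (pvNodesOf l)

theorem pvSet_ofList_append_pair (xs : List String) (a b : String) :
    PySem.Set.ofList (xs ++ [a, b]) = PySem.Set.add (PySem.Set.add (PySem.Set.ofList xs) a) b := by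
  simp [PySem.Set.ofList, List.foldl_append]

theorem pvBStep_inv (l : List (String × String)) (d : PySem.Dict String String) (a b : String)
    (h : pvInvFull l d) : pvInvFull (l ++ [(a, b)]) (pvBStep d a b) := by
  obtain ⟨hC, hkeys⟩ := h
  have h1 : pvInvC l (d.setdefault a a) := pvInvC_setdefault l d a hC
  have h2 : pvInvC l ((d.setdefault a a).setdefault b b) :=
    pvInvC_setdefault l (d.setdefault a a) b h1
  have ha1 : a ∈ (d.setdefault a a).keys := by
    rw [pvKeys_setdefault_self]
    exact (PySem.Set.mem_add _ _ _).mpr (Or.inr rfl)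
  have ha2 : a ∈ ((d.setdefault a a).setdefault b b).keys := by
    rw [pvKeys_setdefault_self]
    exact (PySem.Set.mem_add _ _ _).mpr (Or.inl ha1)
  have hb2 : b ∈ ((d.setdefault a a).setdefault b b).keys := by
    rw [pvKeys_setdefault_self]
    exact (PySem.Set.mem_add _ _ _).mpr (Or.inr rfl)
  have hla : (d.setdefault a a).getD a a = pvLab ((d.setdefault a a).setdefault b b) a := by
    rw [pvLab_getD _ a a ha1, pvLab_setdefault_of_mem _ b a ha1]
  have hlb : ((d.setdefault a a).setdefault b b).getD b b =
      pvLab ((d.setdefault a a).setdefault b b) b := pvLab_getD _ b b hb2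
  have hstep : pvBStep d a b =
      (if pvLab ((d.setdefault a a).setdefault b b) a ==
          pvLab ((d.setdefault a a).setdefault b b) b then (d.setdefault a a).setdefault b b
        else pvRelabel ((d.setdefault a a).setdefault b b)
          (pvLab ((d.setdefault a a).setdefault b b) a)
          (pvLab ((d.setdefault a a).setdefault b b) b)) := by
    simp only [pvBStep]
    rw [hla, hlb]
  constructor
  · rw [hstep]
    exact pvInvC_union l _ a b h2 ha2 hb2
  · have hk2 : ((d.setdefault a a).setdefault b b).keys =
        PySem.Set.ofList (pvNodesOf (l ++ [(a, b)])) := by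
      rw [pvKeys_setdefault_self, pvKeys_setdefault_self, hkeys,
        pvNodesOf_append_pair, pvSet_ofList_append_pair]
    rw [hstep]
    split
    · exact hk2
    · rw [pvRelabel_keys]; exact hk2

theorem pvInv_foldl (E : List (String × String)) :
    pvInvFull E (E.foldl (fun d e => pvBStep d e.1 e.2) PySem.Dict.empty) := by
  induction E using List.reverseRecOn with
  | nil =>
    refine ⟨⟨?_, ?_, ?_⟩, ?_⟩ <;> simp [pvNodesOf, PySem.Dict.empty, PySem.Dict.keys, PySem.Set.ofList]
  | append_singleton l e ih =>
    rw [List.foldl_append]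
    simpa using pvBStep_inv l _ e.1 e.2 ih

-- ===== A-side: the neighbour-collection fold =====

theorem pvBfsFold_spec (ys q0 : List String) (seen0 : PySem.Set String) :
    ∃ new : List String,
      ys.foldl (fun (p : List String × PySem.Set String) nxt =>
          if PySem.Set.contains p.2 nxt then p else (p.1 ++ [nxt], PySem.Set.add p.2 nxt))
        (q0, seen0) = (q0 ++ new, seen0 ++ new) ∧
      new.Nodup ∧ (∀ x ∈ new, x ∈ ys ∧ x ∉ seen0) ∧ (∀ y ∈ ys, y ∈ seen0 ∨ y ∈ new) := by
  induction ys generalizing q0 seen0 with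
  | nil => exact ⟨[], by simp, List.nodup_nil, by simp, by simp⟩
  | cons y t ih =>
    by_cases hy : y ∈ seen0
    · have hc : PySem.Set.contains seen0 y = true := List.contains_iff_mem.mpr hy
      obtain ⟨new, heq, hnd, hmem, hcov⟩ := ih q0 seen0
      refine ⟨new, ?_, hnd, fun x hx => ⟨List.mem_cons_of_mem y (hmem x hx).1, (hmem x hx).2⟩, ?_⟩
      · rw [List.foldl_cons, if_pos hc]
        exact heq
      · intro z hz
        rcases List.mem_cons.mp hz with rfl | hz
        · exact Or.inl hy
        · exact hcov z hz
    · have hc : ¬ (PySem.Set.contains seen0 y = true) := by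
        simpa using (List.contains_iff_mem).not.mpr hy
      have hadd : PySem.Set.add seen0 y = seen0 ++ [y] := by
        rw [PySem.Set.add, if_neg hc]
      obtain ⟨new, heq, hnd, hmem, hcov⟩ := ih (q0 ++ [y]) (seen0 ++ [y])
      refine ⟨y :: new, ?_, ?_, ?_, ?_⟩
      · rw [List.foldl_cons, if_neg hc, hadd, heq]
        simp [List.append_assoc]
      · refine List.nodup_cons.mpr ⟨?_, hnd⟩
        intro hyn
        exact (hmem y hyn).2 (by simp)
      · intro x hx
        rcases List.mem_cons.mp hx with rfl | hx
        · exact ⟨by simp, hy⟩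
        · obtain ⟨h1, h2⟩ := hmem x hx
          exact ⟨List.mem_cons_of_mem y h1, fun hds => h2 (by simp [hds])⟩
      · intro z hz
        rcases List.mem_cons.mp hz with rfl | hz
        · exact Or.inr (by simp)
        · rcases hcov z hz with h | h
          · rcases List.mem_append.mp h with h | h
            · exact Or.inl h
            · exact Or.inr (by simp at h; simp [h])
          · exact Or.inr (by simp [h])

theorem pvSet_contains_iff (s : PySem.Set String) (x : String) :
    PySem.Set.contains s x = true ↔ x ∈ s := by
  simp [PySem.Set.contains]

theorem pvSet_add_of_mem {s : PySem.Set String} {x : String} (h : x ∈ s) :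
    PySem.Set.add s x = s := by
  rw [PySem.Set.add, if_pos ((pvSet_contains_iff s x).mpr h)]

theorem pvSet_add_of_not_mem {s : PySem.Set String} {x : String} (h : x ∉ s) :
    PySem.Set.add s x = s ++ [x] := by
  rw [PySem.Set.add, if_neg (fun hc => h ((pvSet_contains_iff s x).mp hc))]

-- the class of s, collected: terminal characterisation

theorem pvBfs_cover (E : List (String × String)) (lab : String → String) (ns : List String)
    (hns : ∀ x y : String, pvStep E x y → x ∈ ns ∧ y ∈ ns)
    (hlab1 : ∀ x y : String, pvStep E x y → lab x = lab y)
    (hlab2 : ∀ x y : String, x ∈ ns → y ∈ ns → lab x = lab y → pvConn E x y)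
    (s : String) (hs : s ∈ ns) (added Sl : List String)
    (haddC : ∀ x ∈ added, x ∈ ns ∧ lab x = lab s)
    (hSl : ∀ x ∈ Sl, ¬(x ∈ ns ∧ lab x = lab s))
    (hclosed : ∀ x ∈ added, ∀ y : String, pvStep E x y → y ∈ Sl ++ added)
    (hsmem : s ∈ added) :
    ∀ x : String, x ∈ added ↔ (x ∈ ns ∧ lab x = lab s) := by
  have key : ∀ u v : String, pvConn E u v → ((u ∈ added → v ∈ added) ∧ (v ∈ added → u ∈ added)) := by
    intro u v hc
    induction hc with
    | rel u v huv =>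
      constructor
      · intro hu
        have hvns := (hns u v huv).2
        have hvlab : lab v = lab s := (hlab1 u v huv) ▸ (haddC u hu).2
        rcases List.mem_append.mp (hclosed u hu v huv) with h | h
        · exact absurd ⟨hvns, hvlab⟩ (hSl v h)
        · exact h
      · intro hv
        have huns := (hns u v huv).1
        have hulab : lab u = lab s := (hlab1 u v huv) ▸ (haddC v hv).2
        rcases List.mem_append.mp (hclosed v hv u (pvStep_symm huv)) with h | h
        · exact absurd ⟨huns, hulab⟩ (hSl u h)
        · exact h
    | refl u => exact ⟨id, id⟩
    | symm u v _ ih => exact ⟨ih.2, ih.1⟩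
    | trans u v w _ _ ih1 ih2 => exact ⟨fun h => ih2.1 (ih1.1 h), fun h => ih1.2 (ih2.2 h)⟩
  intro x
  constructor
  · exact haddC x
  · rintro ⟨hxns, hxlab⟩
    exact (key s x (hlab2 s x hs hxns hxlab.symm)).1 hsmem

theorem pvBfs_spec (E : List (String × String)) (adj : PySem.Dict String (PySem.Set String))
    (lab : String → String) (ns : List String)
    (hadj : ∀ x y : String, (y ∈ ((adj.get? x).getD PySem.Set.empty)) ↔ pvStep E x y)
    (hns : ∀ x y : String, pvStep E x y → x ∈ ns ∧ y ∈ ns)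
    (hlab1 : ∀ x y : String, pvStep E x y → lab x = lab y)
    (hlab2 : ∀ x y : String, x ∈ ns → y ∈ ns → lab x = lab y → pvConn E x y)
    (s : String) (hs : s ∈ ns) :
    ∀ (fuel : Nat) (q done added Sl : List String) (size : Int),
      (∀ x ∈ q, x ∈ added) → q.Nodup → done.Nodup → (∀ x ∈ done, x ∉ q) →
      added.Nodup → added.Perm (done ++ q) →
      (∀ x ∈ added, x ∈ ns ∧ lab x = lab s) →
      (∀ x ∈ Sl, ¬(x ∈ ns ∧ lab x = lab s)) →
      (∀ x ∈ done, ∀ y : String, pvStep E x y → y ∈ Sl ++ added) →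
      size = (done.length : Int) →
      (ns.filter (fun x => lab x == lab s)).length ≤ fuel + done.length →
      s ∈ added →
      ∃ af : List String,
        pvBfs adj fuel q (Sl ++ added) size = (Sl ++ af, (af.length : Int)) ∧
        af.Nodup ∧ (∀ x : String, x ∈ af ↔ (x ∈ ns ∧ lab x = lab s)) := by
  intro fuel
  induction fuel with
  | zero =>
    intro q done added Sl size hq hqnd hdnd hdisj hand hperm haddC hSl hclosed hsize hfuel hsmem
    -- out of fuel: the queue must already be empty by counting
    have hsubC : added ⊆ ns.filter (fun x => lab x == lab s) := by
      intro x hx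
      rcases haddC x hx with ⟨h1, h2⟩
      exact List.mem_filter.mpr ⟨h1, by simpa using h2⟩
    have hlen : added.length ≤ (ns.filter (fun x => lab x == lab s)).length :=
      (List.subperm_of_subset hand hsubC).length_le
    have hlen2 : added.length = done.length + q.length := by
      simpa using hperm.length_eq
    have hqnil : q = [] := by
      have hq0 : q.length = 0 := by omega
      exact List.eq_nil_of_length_eq_zero hq0
    subst hqnil
    have hpermd : added.Perm done := by simpa using hperm
    have hiff := pvBfs_cover E lab ns hns hlab1 hlab2 s hs added Sl haddC hSl
      (fun x hx y hy => hclosed x (hpermd.mem_iff.mp hx) y hy) hsmem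
    refine ⟨added, ?_, hand, hiff⟩
    have hlen3 : size = (added.length : Int) := by
      rw [hsize, hpermd.length_eq]
    rw [pvBfs, hlen3]
  | succ fuel ih =>
    intro q done added Sl size hq hqnd hdnd hdisj hand hperm haddC hSl hclosed hsize hfuel hsmem
    match q with
    | [] =>
      have hpermd : added.Perm done := by simpa using hperm
      have hiff := pvBfs_cover E lab ns hns hlab1 hlab2 s hs added Sl haddC hSl
        (fun x hx y hy => hclosed x (hpermd.mem_iff.mp hx) y hy) hsmem
      refine ⟨added, ?_, hand, hiff⟩
      have hlen3 : size = (added.length : Int) := by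
        rw [hsize, hpermd.length_eq]
      rw [pvBfs, hlen3]
    | cur :: rest =>
      obtain ⟨new, heq, hnewnd, hnewm, hncov⟩ :=
        pvBfsFold_spec ((adj.get? cur).getD PySem.Set.empty) rest (Sl ++ added)
      have hcura : cur ∈ added := hq cur (by simp)
      have hcurC := haddC cur hcura
      -- facts about new elements
      have hnew1 : ∀ x ∈ new, pvStep E cur x := by
        intro x hx
        exact (hadj cur x).mp (hnewm x hx).1
      have hnewC : ∀ x ∈ new, x ∈ ns ∧ lab x = lab s := by
        intro x hx
        refine ⟨(hns cur x (hnew1 x hx)).2, ?_⟩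
        rw [← hlab1 cur x (hnew1 x hx)]
        exact hcurC.2
      have hnewfresh : ∀ x ∈ new, x ∉ Sl ++ added := fun x hx => (hnewm x hx).2
      have hrestadd : ∀ x ∈ rest, x ∈ added := fun x hx => hq x (by simp [hx])
      obtain ⟨af, hbfs, hafnd, hafm⟩ := ih (rest ++ new) (done ++ [cur]) (added ++ new) Sl (size + 1)
        (by intro x hx
            rcases List.mem_append.mp hx with h | h
            · exact List.mem_append.mpr (Or.inl (hrestadd x h))
            · exact List.mem_append.mpr (Or.inr h))
        (by refine List.Nodup.append (hqnd.of_cons) hnewnd ?_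
            intro x hx1 hx2
            exact hnewfresh x hx2 (List.mem_append.mpr (Or.inr (hrestadd x hx1))))
        (by refine List.Nodup.append hdnd (List.nodup_singleton cur) ?_
            intro x hx1 hx2
            rw [List.mem_singleton.mp hx2] at hx1
            exact hdisj cur hx1 (by simp))
        (by intro x hx
            rcases List.mem_append.mp hx with h | h
            · intro hc
              rcases List.mem_append.mp hc with h2 | h2
              · exact hdisj x h (by simp [h2])
              · exact hnewfresh x h2 (List.mem_append.mpr (Or.inr (hperm.mem_iff.mpr (List.mem_append.mpr (Or.inl h)))))
            · rw [List.mem_singleton.mp h]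
              intro hc
              rcases List.mem_append.mp hc with h2 | h2
              · exact (List.nodup_cons.mp hqnd).1 h2
              · exact hnewfresh cur h2 (List.mem_append.mpr (Or.inr hcura)))
        (by refine List.Nodup.append hand hnewnd ?_
            intro x hx1 hx2
            exact hnewfresh x hx2 (List.mem_append.mpr (Or.inr hx1)))
        (by have h1 : (added ++ new).Perm ((done ++ (cur :: rest)) ++ new) := hperm.append_right new
            have h2 : (done ++ (cur :: rest)) ++ new = (done ++ [cur]) ++ (rest ++ new) := by simp
            rw [h2] at h1
            exact h1)
        (by intro x hx
            rcases List.mem_append.mp hx with h | h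
            · exact haddC x h
            · exact hnewC x h)
        hSl
        (by intro x hx y hy
            rcases List.mem_append.mp hx with h | h
            · rcases List.mem_append.mp (hclosed x h y hy) with h2 | h2
              · exact List.mem_append.mpr (Or.inl h2)
              · exact List.mem_append.mpr (Or.inr (List.mem_append.mpr (Or.inl h2)))
            · rw [List.mem_singleton.mp h] at hy
              have hyadj : y ∈ ((adj.get? cur).getD PySem.Set.empty) := (hadj cur y).mpr hy
              rcases hncov y hyadj with h2 | h2
              · rcases List.mem_append.mp h2 with h3 | h3
                · exact List.mem_append.mpr (Or.inl h3)
                · exact List.mem_append.mpr (Or.inr (List.mem_append.mpr (Or.inl h3)))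
              · exact List.mem_append.mpr (Or.inr (List.mem_append.mpr (Or.inr h2))))
        (by rw [hsize]; simp)
        (by simp only [List.length_append, List.length_singleton]; omega)
        (List.mem_append.mpr (Or.inl hsmem))
      refine ⟨af, ?_, hafnd, hafm⟩
      rw [pvBfs]
      simp only [heq]
      rw [List.append_assoc]
      exact hbfs

theorem pvOuter_spec (E : List (String × String)) (adj : PySem.Dict String (PySem.Set String))
    (lab : String → String) (ns : List String)
    (hadj : ∀ x y : String, (y ∈ ((adj.get? x).getD PySem.Set.empty)) ↔ pvStep E x y)
    (hns : ∀ x y : String, pvStep E x y → x ∈ ns ∧ y ∈ ns)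
    (hlab1 : ∀ x y : String, pvStep E x y → lab x = lab y)
    (hlab2 : ∀ x y : String, x ∈ ns → y ∈ ns → lab x = lab y → pvConn E x y)
    (hnsd : ns.Nodup) :
    ∀ (l : List String), (∀ x ∈ l, x ∈ ns) →
    ∀ (sl : PySem.Set String) (sizes : List Int) (L : List String),
      (∀ x : String, x ∈ sl ↔ (x ∈ ns ∧ lab x ∈ L)) →
      sizes = L.map (fun lb => ((ns.filter (fun x => lab x == lb)).length : Int)) →
      ∃ sl' : PySem.Set String,
        l.foldl (fun (st : PySem.Set String × List Int) start =>
            if PySem.Set.contains st.1 start then st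
            else
              let r := pvBfs adj ns.length [start] (PySem.Set.add st.1 start) 0
              (r.1, st.2 ++ [r.2])) (sl, sizes) =
          (sl', (PySem.Set.update L (l.map lab)).map
            (fun lb => ((ns.filter (fun x => lab x == lb)).length : Int))) ∧
        (∀ x : String, x ∈ sl' ↔ (x ∈ ns ∧ lab x ∈ PySem.Set.update L (l.map lab))) := by
  intro l
  induction l with
  | nil =>
    intro _ sl sizes L hseen hsizes
    exact ⟨sl, by simp [PySem.Set.update, hsizes], hseen⟩
  | cons start t ih =>
    intro hsub sl sizes L hseen hsizes
    have hstart : start ∈ ns := hsub start (by simp)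
    have hupd : PySem.Set.update L ((start :: t).map lab) =
        PySem.Set.update (PySem.Set.add L (lab start)) (t.map lab) := by
      simp [PySem.Set.update]
    by_cases hmem : lab start ∈ L
    · have hcont : PySem.Set.contains sl start = true :=
        List.contains_iff_mem.mpr ((hseen start).mpr ⟨hstart, hmem⟩)
      have haddL : PySem.Set.add L (lab start) = L := pvSet_add_of_mem hmem
      rw [List.foldl_cons, if_pos hcont, hupd, haddL]
      exact ih (fun x hx => hsub x (by simp [hx])) sl sizes L hseen hsizes
    · have hcont : ¬ (PySem.Set.contains sl start = true) := by
        intro hc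
        exact hmem ((hseen start).mp ((pvSet_contains_iff sl start).mp hc)).2
      have hslstart : start ∉ sl := fun hc => hcont ((pvSet_contains_iff sl start).mpr hc)
      have haddsl : PySem.Set.add sl start = sl ++ [start] := pvSet_add_of_not_mem hslstart
      obtain ⟨af, hbfs, hafnd, hafm⟩ := pvBfs_spec E adj lab ns hadj hns hlab1 hlab2 start hstart
        ns.length [start] [] [start] sl 0
        (by simp) (List.nodup_singleton _) List.nodup_nil (by simp) (List.nodup_singleton _)
        (by simp) (by simp [hstart]) 
        (by intro x hx hCx
            exact hmem (hCx.2 ▸ ((hseen x).mp hx).2))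
        (by simp) (by simp)
        (by simpa using List.length_filter_le _ ns)
        (by simp)
      have haddL : PySem.Set.add L (lab start) = L ++ [lab start] := pvSet_add_of_not_mem hmem
      have hafperm : af.Perm (ns.filter (fun x => lab x == lab start)) := by
        rw [List.perm_ext_iff_of_nodup hafnd (hnsd.filter _)]
        intro x
        rw [hafm x, List.mem_filter]
        simp
      have hsize_eq : ((af.length : Int)) =
          ((ns.filter (fun x => lab x == lab start)).length : Int) :=
        congrArg _ hafperm.length_eq
      obtain ⟨sl', heq', hseen'⟩ := ih (fun x hx => hsub x (by simp [hx])) (sl ++ af)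
        (sizes ++ [(af.length : Int)]) (L ++ [lab start])
        (by intro x
            constructor
            · intro hx
              rcases List.mem_append.mp hx with h | h
              · obtain ⟨h1, h2⟩ := (hseen x).mp h
                exact ⟨h1, List.mem_append.mpr (Or.inl h2)⟩
              · obtain ⟨h1, h2⟩ := (hafm x).mp h
                exact ⟨h1, List.mem_append.mpr (Or.inr (by simp [h2]))⟩
            · rintro ⟨h1, h2⟩
              rcases List.mem_append.mp h2 with h | h
              · exact List.mem_append.mpr (Or.inl ((hseen x).mpr ⟨h1, h⟩))
              · exact List.mem_append.mpr (Or.inr ((hafm x).mpr ⟨h1, by simpa using h⟩)))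
        (by rw [hsizes, List.map_append, List.map_singleton, hsize_eq])
      refine ⟨sl', ?_, ?_⟩
      · rw [List.foldl_cons, if_neg hcont]
        simp only [haddsl]
        rw [hbfs, hupd, haddL]
        exact heq'
      · intro x
        rw [hupd, haddL]
        exact hseen' x

-- ===== adjacency dict characterisation =====

theorem pvAdj0_getD (l : List String) (d : PySem.Dict String (PySem.Set String))
    (h : ∀ x : String, d.getD x PySem.Set.empty = PySem.Set.empty) :
    ∀ x : String,
      (l.foldl (fun d n => d.insert n PySem.Set.empty) d).getD x PySem.Set.empty =
        PySem.Set.empty := by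
  induction l generalizing d with
  | nil => exact h
  | cons n t ih =>
    rw [List.foldl_cons]
    refine ih (d.insert n PySem.Set.empty) ?_
    intro x
    rw [PySem.Dict.getD_insert]
    split
    · rfl
    · exact h x

theorem pvAdjStep_mem (d : PySem.Dict String (PySem.Set String)) (a b x y : String) :
    (y ∈ ((d.modify a PySem.Set.empty (fun s => PySem.Set.add s b)).modify b PySem.Set.empty
        (fun s => PySem.Set.add s a)).getD x PySem.Set.empty) ↔
      (y ∈ d.getD x PySem.Set.empty ∨ ((x = a ∧ y = b) ∨ (x = b ∧ y = a))) := by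
  rw [PySem.Dict.getD_modify]
  by_cases hxb : x = b
  · subst hxb
    rw [if_pos rfl, PySem.Set.mem_add, PySem.Dict.getD_modify]
    by_cases hxa : x = a
    · subst hxa
      rw [if_pos rfl, PySem.Set.mem_add]
      tauto
    · rw [if_neg hxa]
      tauto
  · rw [if_neg hxb, PySem.Dict.getD_modify]
    by_cases hxa : x = a
    · subst hxa
      rw [if_pos rfl, PySem.Set.mem_add]
      tauto
    · rw [if_neg hxa]
      tauto

theorem pvAdjFold_mem (l : List (String × String)) (d : PySem.Dict String (PySem.Set String))
    (x y : String) :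
    (y ∈ (l.foldl (fun d e => (d.modify e.1 PySem.Set.empty (fun s => PySem.Set.add s e.2)).modify
        e.2 PySem.Set.empty (fun s => PySem.Set.add s e.1)) d).getD x PySem.Set.empty) ↔
      (y ∈ d.getD x PySem.Set.empty ∨ pvStep l x y) := by
  induction l generalizing d with
  | nil => simp [pvStep]
  | cons e t ih =>
    rw [List.foldl_cons, ih, pvAdjStep_mem]
    have : pvStep (e :: t) x y ↔ (pvStep t x y ∨ ((x = e.1 ∧ y = e.2) ∨ (x = e.2 ∧ y = e.1))) := by
      simp [pvStep, List.mem_cons, Prod.ext_iff]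
      tauto
    rw [this]
    tauto

theorem pvMax?_perm (l1 l2 : List Int) (h : l1.Perm l2) :
    PySem.List.max? l1 (fun x => x) = PySem.List.max? l2 (fun x => x) := by
  cases h1 : PySem.List.max? l1 (fun x => x) with
  | none =>
    rw [PySem.List.max?_eq_none_iff] at h1
    subst h1
    rw [(PySem.List.max?_eq_none_iff l2 _).mpr h.nil_eq.symm]
  | some m1 =>
    cases h2 : PySem.List.max? l2 (fun x => x) with
    | none =>
      rw [PySem.List.max?_eq_none_iff] at h2
      subst h2
      rw [(PySem.List.max?_eq_none_iff l1 _).mpr h.eq_nil] at h1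
      cases h1
    | some m2 =>
      have hm1 : m1 ∈ l2 := h.mem_iff.mp (PySem.List.max?_mem h1)
      have hm2 : m2 ∈ l1 := h.mem_iff.mpr (PySem.List.max?_mem h2)
      exact congrArg some (le_antisymm (PySem.List.max?_isMax h2 m1 hm1)
        (PySem.List.max?_isMax h1 m2 hm2))

theorem pvNodesOf_mem_iff (E : List (String × String)) (x : String) :
    x ∈ pvNodesOf E ↔ (x ∈ E.map Prod.fst ∨ x ∈ E.map Prod.snd) := by
  simp only [pvNodesOf, List.mem_flatMap, List.mem_map, List.mem_cons]
  constructor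
  · rintro ⟨e, he, h⟩
    rcases h with rfl | h
    · exact Or.inl ⟨e, he, rfl⟩
    · rcases h with rfl | h
      · exact Or.inr ⟨e, he, rfl⟩
      · cases h
  · rintro (⟨e, he, rfl⟩ | ⟨e, he, rfl⟩)
    · exact ⟨e, he, Or.inl rfl⟩
    · exact ⟨e, he, Or.inr (Or.inl rfl)⟩

theorem pvMainEq (rows : List (List (String × String))) :
    graph_components rows = graph_components_alt rows := by
  -- B's label fold, rewritten over the edge list
  have hBfold : rows.foldl (fun (d : PySem.Dict String String) r =>
      let a := pvKeyB r "source"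
      let b := pvKeyB r "target"
      let d := d.setdefault a a
      let la := d.getD a a
      let d := d.setdefault b b
      let lb := d.getD b b
      if la == lb then d else pvRelabel d la lb) PySem.Dict.empty
      = (rows.map (fun r => (pvKeyA r "source", pvKeyA r "target"))).foldl
          (fun d e => pvBStep d e.1 e.2) PySem.Dict.empty := by
    rw [List.foldl_map]
    refine List.foldl_ext _ _ _ ?_
    intro d r _
    show pvBStep d (pvKeyB r "source") (pvKeyB r "target")
        = pvBStep d (pvKeyA r "source") (pvKeyA r "target")
    rw [pvKeyB_eq_pvKeyA, pvKeyB_eq_pvKeyA]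
  simp only [graph_components, graph_components_alt]
  rw [hBfold]
  set E := rows.map (fun r => (pvKeyA r "source", pvKeyA r "target")) with hE
  obtain ⟨⟨hN, hK, hC⟩, hkeys⟩ := pvInv_foldl E
  set labelD := E.foldl (fun d e => pvBStep d e.1 e.2) PySem.Dict.empty with hlabelD
  set lab := pvLab labelD with hlab
  set K := labelD.keys with hKdef
  have hKnd : K.Nodup := by rw [hkeys]; exact PySem.Set.nodup_ofList _
  have hKmem : ∀ x : String, x ∈ K ↔ x ∈ pvNodesOf E := by
    intro x; rw [hkeys]; exact PySem.Set.mem_ofList _ x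
  have hsrc : rows.map (fun r => pvKeyA r "source") = E.map Prod.fst := by
    rw [hE, List.map_map]; rfl
  have htgt : rows.map (fun r => pvKeyA r "target") = E.map Prod.snd := by
    rw [hE, List.map_map]; rfl
  rw [hsrc, htgt]
  set ns := PySem.List.sorted
      (PySem.Set.union (PySem.Set.ofList (E.map Prod.fst)) (PySem.Set.ofList (E.map Prod.snd)))
      (fun x => x) false with hnsdef
  have hnmem : ∀ x : String, x ∈ ns ↔ x ∈ pvNodesOf E := by
    intro x
    rw [hnsdef, PySem.List.mem_sorted, PySem.Set.mem_union, PySem.Set.mem_ofList,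
      PySem.Set.mem_ofList, pvNodesOf_mem_iff]
  have hnsd : ns.Nodup := by
    rw [hnsdef]
    exact (PySem.List.sorted_perm _ _ _).nodup_iff.mpr
      (PySem.Set.nodup_union _ _ (PySem.Set.nodup_ofList _))
  have hnsK : ns.Perm K :=
    (List.perm_ext_iff_of_nodup hnsd hKnd).mpr (fun a => (hnmem a).trans (hKmem a).symm)
  have hKlen : K.length = labelD.size := by
    rw [hKdef]
    simp [PySem.Dict.keys, PySem.Dict.size]
  by_cases hemp : ns = []
  · have h1 : ns.isEmpty = true := by simp [hemp]
    have hKnil : K = [] := by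
      have hp := hnsK
      rw [hemp] at hp
      exact hp.nil_eq.symm
    have h2 : (labelD.size == 0) = true := by
      have : labelD.size = 0 := by rw [← hKlen, hKnil]; rfl
      simp [this]
    rw [h1, h2]
    simp
  · have h1 : ns.isEmpty = false := by
      simpa using hemp
    have hKne : K ≠ [] := by
      intro hk
      rw [hk] at hnsK
      exact hemp hnsK.eq_nil
    have h2 : (labelD.size == 0) = false := by
      have : labelD.size ≠ 0 := by
        rw [← hKlen]
        simpa [List.length_eq_zero_iff] using hKne
      simpa using this
    rw [h1, h2]
    simp only [Bool.false_eq_true, if_false]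
    have hAfold : rows.foldl
        (fun (d : PySem.Dict String (PySem.Set String)) r =>
          (d.modify (pvKeyA r "source") PySem.Set.empty fun s => s.add (pvKeyA r "target")).modify
            (pvKeyA r "target") PySem.Set.empty fun s => s.add (pvKeyA r "source"))
        (List.foldl (fun d n => d.insert n PySem.Set.empty) PySem.Dict.empty ns)
      = E.foldl
        (fun d e =>
          (d.modify e.1 PySem.Set.empty fun s => PySem.Set.add s e.2).modify e.2 PySem.Set.empty
            fun s => PySem.Set.add s e.1)
        (List.foldl (fun d n => d.insert n PySem.Set.empty) PySem.Dict.empty ns) := by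
      rw [hE, List.foldl_map]
    rw [hAfold]
    set adj := E.foldl
        (fun d e =>
          (d.modify e.1 PySem.Set.empty fun s => PySem.Set.add s e.2).modify e.2 PySem.Set.empty
            fun s => PySem.Set.add s e.1)
        (List.foldl (fun d n => d.insert n PySem.Set.empty) PySem.Dict.empty ns) with hadjdef
    have hadjchar : ∀ x y : String, (y ∈ (adj.get? x).getD PySem.Set.empty) ↔ pvStep E x y := by
      intro x y
      rw [← PySem.Dict.getD_eq_get?_getD, hadjdef, pvAdjFold_mem]
      rw [pvAdj0_getD ns PySem.Dict.empty (fun z => rfl) x]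
      simp [PySem.Set.empty]
    have hstep_ns : ∀ x y : String, pvStep E x y → x ∈ ns ∧ y ∈ ns := fun x y h =>
      ⟨(hnmem x).mpr (pvStep_mem_nodes h).1, (hnmem y).mpr (pvStep_mem_nodes h).2⟩
    have hlab1 : ∀ x y : String, pvStep E x y → lab x = lab y := by
      intro x y h
      exact (hC x ((hKmem x).mpr (pvStep_mem_nodes h).1) y
        ((hKmem y).mpr (pvStep_mem_nodes h).2)).mpr (Relation.EqvGen.rel x y h)
    have hlab2 : ∀ x y : String, x ∈ ns → y ∈ ns → lab x = lab y → pvConn E x y := by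
      intro x y hx hy hl
      exact (hC x ((hKmem x).mpr ((hnmem x).mp hx)) y ((hKmem y).mpr ((hnmem y).mp hy))).mp hl
    obtain ⟨sl', houter, _⟩ := pvOuter_spec E adj lab ns hadjchar hstep_ns hlab1 hlab2 hnsd ns
      (fun x hx => hx) PySem.Set.empty [] []
      (by simp [PySem.Set.empty]) (by simp)
    have houter2 : (List.foldl
        (fun (st : PySem.Set String × List Int) start =>
          if PySem.Set.contains st.1 start then st
          else ((pvBfs adj ns.length [start] (PySem.Set.add st.1 start) 0).1,
                st.2 ++ [(pvBfs adj ns.length [start] (PySem.Set.add st.1 start) 0).2]))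
        (PySem.Set.empty, ([] : List Int)) ns)
      = (sl', (PySem.Set.update [] (ns.map lab)).map
          (fun lb => ((ns.filter (fun x => lab x == lb)).length : Int))) := houter
    rw [houter2]
    rw [show PySem.Set.update ([] : PySem.Set String) (ns.map lab)
        = PySem.Set.ofList (ns.map lab) from rfl]
    have hvals : labelD.values = K.map lab := by
      rw [PySem.Dict.values_eq_map_keys labelD hKnd ""]
      rfl
    have hcnt : List.foldl (fun (c : PySem.Dict String Int) l => c.insert l (c.getD l 0 + 1))
        PySem.Dict.empty labelD.values = PySem.Dict.counter labelD.values :=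
      PySem.Dict.foldl_insert_getD_add_one_eq_counter _
    rw [hcnt, hvals]
    have hLfperm : (PySem.Set.ofList (ns.map lab)).Perm (PySem.Set.ofList (K.map lab)) := by
      rw [List.perm_ext_iff_of_nodup (PySem.Set.nodup_ofList _) (PySem.Set.nodup_ofList _)]
      intro z
      rw [PySem.Set.mem_ofList, PySem.Set.mem_ofList, (hnsK.map lab).mem_iff]
    have hcsize : (PySem.Dict.counter (K.map lab)).size =
        (PySem.Set.ofList (K.map lab)).length := by
      show (PySem.Dict.counter (K.map lab)).items.length = _
      rw [PySem.Dict.items_counter, List.length_map]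
    have hcvals : (PySem.Dict.counter (K.map lab)).values =
        (PySem.Set.ofList (K.map lab)).map (fun k => ((List.count k (K.map lab) : Nat) : Int)) := by
      show (PySem.Dict.counter (K.map lab)).items.map _ = _
      rw [PySem.Dict.items_counter, List.map_map]
      rfl
    have hfg : ∀ lb : String, (((List.count lb (K.map lab) : Nat)) : Int) =
        ((ns.filter (fun x => lab x == lb)).length : Int) := by
      intro lb
      congr 1
      rw [List.count_eq_countP, List.countP_map, ← List.Perm.countP_eq _ hnsK,
        List.countP_eq_length_filter]
      rfl
    have hargsB : (PySem.Dict.counter (K.map lab)).values =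
        (PySem.Set.ofList (K.map lab)).map
          (fun lb => ((ns.filter (fun x => lab x == lb)).length : Int)) := by
      rw [hcvals]
      exact List.map_congr_left (fun lb _ => hfg lb)
    have hperm_args : ((PySem.Set.ofList (ns.map lab)).map
          (fun lb => ((ns.filter (fun x => lab x == lb)).length : Int))).Perm
        ((PySem.Dict.counter (K.map lab)).values) := by
      rw [hargsB]
      exact hLfperm.map _
    simp only [Prod.mk.injEq]
    refine ⟨?_, ?_, ?_⟩
    · rw [hnsK.length_eq, hKlen]
    · rw [List.length_map, hcsize, hLfperm.length_eq]
    · rw [pvMax?_perm _ _ hperm_args]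

-- ===== VERDICT (by name: the statement is the Claim_ definition above) =====
theorem graph_components_spec : Claim_equal_graph_components := by
  intro rows _ _
  exact pvMainEq rows
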